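-- pv_equiv track=rewrite | github.com/Bluerrror/torchvine | torchvine/rvine_structure.py | make_dvine_struct_array
-- ===== SOURCE A (Python) =====
-- def make_dvine_struct_array(d: int, trunc_lvl: int) -> list[list[int]]:
--     # Mirrors C++ RVineStructure::make_dvine_struct_array()
--     out: list[list[int]] = []
--     for i in range(trunc_lvl):
--         row = []
--         for j in range(d - 1 - i):
--             row.append(i + j + 2)
--         out.append(row)
--     return out
-- ===== SOURCE B (Python) =====
-- def make_dvine_struct_array(d: int, trunc_lvl: int) -> list[list[int]]:
--     # Column-major construction: instead of building each row left-to-right,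
--     # distribute each value v = 2..d into every row that contains it
--     # (value v belongs to rows 0..min(v-2, trunc_lvl-1)).
--     out: list[list[int]] = [[] for _ in range(trunc_lvl)]
--     if not out:
--         return out
--     for v in range(2, d + 1):
--         for i in range(min(v - 1, trunc_lvl)):
--             out[i].append(v)
--     return out
-- ===== Notes on version B (the rewrite author's own statement) =====
-- stated objective: alternative
-- what changed: Transposes the traversal: instead of building each row i left-to-right from index arithmetic i+j+2, B preallocates the rows and distributes each value v=2..d column-wise into the rows 0..min(v-2,trunc_lvl-1) that contain it, relying on the monotone membership condition v>=i+2.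
import Mathlib
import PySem

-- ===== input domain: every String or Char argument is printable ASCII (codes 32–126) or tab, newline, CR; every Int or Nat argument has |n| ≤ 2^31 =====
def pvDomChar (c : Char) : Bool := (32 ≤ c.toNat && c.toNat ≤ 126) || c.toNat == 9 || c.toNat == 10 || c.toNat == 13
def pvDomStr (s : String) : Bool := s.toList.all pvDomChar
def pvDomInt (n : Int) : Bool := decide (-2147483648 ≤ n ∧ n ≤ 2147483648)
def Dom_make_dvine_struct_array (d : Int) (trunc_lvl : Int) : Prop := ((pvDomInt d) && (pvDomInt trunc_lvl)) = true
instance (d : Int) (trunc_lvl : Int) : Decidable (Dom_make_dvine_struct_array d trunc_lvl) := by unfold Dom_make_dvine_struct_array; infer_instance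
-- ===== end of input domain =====

-- B transposes the traversal: it preallocates the rows and distributes each value v = 2..d
-- column-wise into the rows 0..min(v-2, trunc_lvl-1) that contain it (alternative decomposition).

-- ===== PORT A =====
def make_dvine_struct_array (d : Int) (trunc_lvl : Int) : List (List Int) :=
  (PySem.List.pyRange 0 trunc_lvl 1).foldl
    (fun out i =>
      out ++ [(PySem.List.pyRange 0 (d - 1 - i) 1).foldl (fun row j => row ++ [i + j + 2]) []])
    []

-- ===== PORT B =====
def make_dvine_struct_array_alt (d : Int) (trunc_lvl : Int) : List (List Int) :=
  let out := (PySem.List.pyRange 0 trunc_lvl 1).map (fun _ => ([] : List Int))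
  if out = [] then out
  else
    (PySem.List.pyRange 2 (d + 1) 1).foldl
      (fun out v =>
        (PySem.List.pyRange 0 (min (v - 1) trunc_lvl) 1).foldl
          (fun out i => out.modify i.toNat (fun row => row ++ [v])) out)
      out

-- ===== PRECONDITION & SPEC =====
def Spec_make_dvine_struct_array (d : Int) (trunc_lvl : Int) (out : List (List Int)) : Prop := out = make_dvine_struct_array_alt d trunc_lvl
instance (d : Int) (trunc_lvl : Int) (out : List (List Int)) : Decidable (Spec_make_dvine_struct_array d trunc_lvl out) := by unfold Spec_make_dvine_struct_array; infer_instance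

-- ===== CLAIM (what is proved, stated in full; the proofs are below) =====
def Claim_equal_make_dvine_struct_array : Prop := ∀ (d : Int) (trunc_lvl : Int), Dom_make_dvine_struct_array d trunc_lvl → Spec_make_dvine_struct_array d trunc_lvl (make_dvine_struct_array d trunc_lvl)

-- ===== LEMMAS AND PROOFS =====

-- a foldl that only appends singletons is a map
theorem pv_foldl_append_singleton {α β : Type} (f : α → β) :
    ∀ (l : List α) (acc : List β),
      l.foldl (fun out i => out ++ [f i]) acc = acc ++ l.map f := by
  intro l
  induction l with
  | nil => intro acc; simp
  | cons x xs ih => intro acc; simp [List.foldl, ih]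

-- B's inner loop over Nat indices, read off pointwise
theorem pv_inner_nat (v : Int) :
    ∀ (n : Nat) (out : List (List Int)) (k : Nat),
      ((List.range n).foldl (fun o i => o.modify i (fun row => row ++ [v])) out)[k]? =
        if k < n then out[k]?.map (· ++ [v]) else out[k]? := by
  intro n
  induction n with
  | zero => intro out k; simp
  | succ n ih =>
    intro out k
    rw [List.range_succ, List.foldl_append]
    simp only [List.foldl_cons, List.foldl_nil]
    rw [List.getElem?_modify, ih]
    by_cases h1 : k < n
    · simp [h1, Nat.lt_succ_of_lt h1, Nat.ne_of_gt h1, Option.map]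
    · by_cases h2 : k = n
      · subst h2
        simp [Nat.lt_irrefl, Nat.lt_succ_self, Option.map]
      · have : ¬ k < n + 1 := by omega
        simp [h1, this, Ne.symm h2, Option.map]

-- B's inner loop (over the Python range 0..m) read off pointwise
theorem pv_inner (v m : Int) (out : List (List Int)) (k : Nat) :
    ((PySem.List.pyRange 0 m 1).foldl (fun o i => o.modify i.toNat (fun row => row ++ [v])) out)[k]? =
      if (k : Int) < m then out[k]?.map (· ++ [v]) else out[k]? := by
  rw [PySem.List.pyRange_one, List.foldl_map]
  have hcast : ∀ i : Nat, ((0 + (i : Int)).toNat) = i := by intro i; omega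
  have : (List.range (m - 0).toNat).foldl
      (fun o (i : Nat) => o.modify (0 + (i : Int)).toNat (fun row => row ++ [v])) out
      = (List.range (m - 0).toNat).foldl (fun o (i : Nat) => o.modify i (fun row => row ++ [v])) out := by
    congr 1; funext o i; rw [hcast]
  rw [this, pv_inner_nat]
  have : k < (m - 0).toNat ↔ (k : Int) < m := by omega
  rw [if_congr this rfl rfl]

-- outer loop invariant: after distributing the values 2..n+1, row k holds [k+2 .. n+1]
theorem pv_outer (t : Int) :
    ∀ (n : Nat) (k : Nat),
      (((List.range n).map (fun j : Nat => (2 : Int) + (j : Int))).foldl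
          (fun out v =>
            (PySem.List.pyRange 0 (min (v - 1) t) 1).foldl
              (fun out i => out.modify i.toNat (fun row => row ++ [v])) out)
          ((PySem.List.pyRange 0 t 1).map (fun _ => ([] : List Int))))[k]? =
        if k < t.toNat then some ((List.range (n - k)).map (fun j : Nat => (k : Int) + (j : Int) + 2)) else none := by
  intro n
  induction n with
  | zero =>
    intro k
    simp only [List.range_zero, List.map_nil, List.foldl_nil]
    by_cases h : k < t.toNat
    · have hk : k < ((PySem.List.pyRange 0 t 1).map (fun _ => ([] : List Int))).length := by
        simp [PySem.List.length_pyRange_one]; omega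
      rw [List.getElem?_eq_getElem hk]
      simp [h]
    · rw [List.getElem?_eq_none]
      · simp [h]
      · simp [PySem.List.length_pyRange_one]; omega
  | succ n ih =>
    intro k
    rw [List.range_succ, List.map_append, List.foldl_append]
    simp only [List.map_cons, List.map_nil, List.foldl_cons, List.foldl_nil]
    rw [pv_inner, ih]
    by_cases hk : k < t.toNat
    · have hkt : (k : Int) < t := by omega
      by_cases hkn : k ≤ n
      · have hc : (k : Int) < min (2 + (n : Int) - 1) t := by
          rw [lt_min_iff]; constructor <;> omega
        rw [if_pos hc, if_pos hk, if_pos hk]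
        simp only [Option.map_some]
        have h1 : n + 1 - k = (n - k) + 1 := by omega
        have hx : (k : Int) + ((n - k : Nat) : Int) + 2 = 2 + (n : Int) := by omega
        rw [h1, List.range_succ, List.map_append, List.map_cons, List.map_nil, hx]
      · have hc : ¬ (k : Int) < min (2 + (n : Int) - 1) t := by
          rw [not_lt, min_le_iff]; left; omega
        rw [if_neg hc, if_pos hk, if_pos hk]
        have h1 : n - k = 0 := by omega
        have h2 : n + 1 - k = 0 := by omega
        rw [h1, h2]
    · rw [if_neg hk, if_neg hk]
      by_cases hc : (k : Int) < min (2 + (n : Int) - 1) t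
      · rw [if_pos hc]; rfl
      · rw [if_neg hc]

-- ===== VERDICT (by name: the statement is the Claim_ definition above) =====
theorem make_dvine_struct_array_spec : Claim_equal_make_dvine_struct_array := by
  intro d t _
  unfold Spec_make_dvine_struct_array make_dvine_struct_array make_dvine_struct_array_alt
  by_cases ht : t ≤ 0
  · rw [pv_foldl_append_singleton]
    simp [PySem.List.pyRange_one_eq_nil ht]
  · have hne : (PySem.List.pyRange 0 t 1).map (fun _ => ([] : List Int)) ≠ [] := by
      intro h
      have hlen := congrArg List.length h
      simp only [List.length_map, PySem.List.length_pyRange_one, List.length_nil] at hlen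
      omega
    simp only [hne, if_false]
    apply List.ext_getElem?
    intro k
    -- B side: values processed are 2 .. d, i.e. (List.range (d-1).toNat) shifted by 2
    have hB : (PySem.List.pyRange 2 (d + 1) 1)
        = (List.range ((d + 1) - 2).toNat).map (fun j : Nat => (2 : Int) + (j : Int)) := by
      rw [PySem.List.pyRange_one]
    rw [hB, pv_outer]
    -- A side
    rw [pv_foldl_append_singleton, List.nil_append, PySem.List.pyRange_one]
    simp only [List.map_map, List.getElem?_map]
    by_cases hk : k < t.toNat
    · have hkr : k < (t - 0).toNat := by omega
      rw [List.getElem?_range hkr, if_pos hk]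
      simp only [Option.map_some, Function.comp]
      congr 1
      rw [pv_foldl_append_singleton, List.nil_append, PySem.List.pyRange_one]
      simp only [List.map_map]
      have hlen : (d - 1 - (0 + (k : Int)) - 0).toNat = ((d + 1) - 2).toNat - k := by omega
      rw [hlen]
      apply List.map_congr_left
      intro j _
      simp only [Function.comp]
      omega
    · rw [if_neg hk, List.getElem?_eq_none (by simp; omega)]
      rfl
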